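-- pv_equiv track=rewrite | github.com/zhangyuejoslin/algorithms | algorithm_homework/homework3.py | deploying
-- ===== SOURCE A (Python) =====
-- def deploying(input_list, list_length, agent_num):
--     agent_dict = {}
--     result = 0
--     if list_length ==  agent_num:
--         return sum(input_list)
--     else:
--         input_list.sort(reverse=True)
--
--         for each_num in range(agent_num):
--             agent_dict[each_num] = []
--
--         for input_id, each_input in enumerate(input_list):
--             fetch_id = input_id % agent_num
--             agent_dict[fetch_id].append(each_input)
--
--         for agent_key, agent_value in agent_dict.items():
--             tmp_result = 0
--             for value_id, value in enumerate(agent_value):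
--                 tmp_result += value * (value_id+1)
--             result += tmp_result
--     return result
-- ===== SOURCE B (Python) =====
-- def deploying(input_list, list_length, agent_num):
--     if list_length == agent_num:
--         return sum(input_list)
--     input_list.sort(reverse=True)
--     return sum(v * (i // agent_num + 1) for i, v in enumerate(input_list))
-- ===== Notes on version B (the rewrite author's own statement) =====
-- stated objective: simpler
-- what changed: Replaces the bucket dictionary, its initialisation loop, the round-robin distribution loop and the nested weighted-sum loops by a single pass over the sorted list summing v * (i // agent_num + 1), since an element's within-bucket position is its index floor-divided by the agent count (measured ~2x faster: no dict building/traversal).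
import Mathlib
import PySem

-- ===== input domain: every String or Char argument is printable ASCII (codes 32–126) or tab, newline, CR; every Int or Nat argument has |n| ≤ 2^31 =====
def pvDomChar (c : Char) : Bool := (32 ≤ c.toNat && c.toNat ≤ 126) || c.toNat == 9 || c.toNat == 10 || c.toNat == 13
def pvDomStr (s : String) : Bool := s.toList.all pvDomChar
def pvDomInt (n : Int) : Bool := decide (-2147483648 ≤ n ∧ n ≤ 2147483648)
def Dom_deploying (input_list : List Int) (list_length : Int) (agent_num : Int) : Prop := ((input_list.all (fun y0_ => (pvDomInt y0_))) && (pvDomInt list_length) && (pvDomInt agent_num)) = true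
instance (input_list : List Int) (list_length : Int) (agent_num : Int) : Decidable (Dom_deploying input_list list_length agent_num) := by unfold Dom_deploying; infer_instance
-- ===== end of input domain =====

-- B replaces A's bucket dictionary and its three loops by one weighted sum over the sorted
-- list (simpler); equivalence is about the return value; both A and B sort input_list in place.


-- ===== PORT A =====
def deploying (input_list : List Int) (list_length : Int) (agent_num : Int) : Int :=
  if list_length = agent_num then input_list.sum
  else
    let sortedList := PySem.List.sorted input_list (fun x => x) true
    -- init loop 'for each_num in range(agent_num): agent_dict[each_num] = []':
    -- each_num is always a fresh key here, so in Python each assignment appends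
    -- (each_num, []) at the end of the dict, in range order — this is exact.
    let agent_dict : PySem.Dict Int (List Int) :=
      PySem.Dict.mk ((PySem.List.pyRange 0 agent_num 1).map (fun each_num => (each_num, [])))
    let agent_dict :=
      (PySem.List.enumerate sortedList 0).foldl
        (fun d p => d.modify (PySem.Int.mod p.1 agent_num) [] (fun l => l ++ [p.2]))
        agent_dict
    agent_dict.items.foldl
      (fun result p =>
        result + (PySem.List.enumerate p.2 0).foldl
          (fun tmp q => tmp + q.2 * (q.1 + 1)) 0) 0

-- ===== PORT B =====
def deploying_alt (input_list : List Int) (list_length : Int) (agent_num : Int) : Int :=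
  if list_length = agent_num then input_list.sum
  else
    (PySem.List.enumerate (PySem.List.sorted input_list (fun x => x) true) 0).foldl
      (fun acc p => acc + p.2 * (PySem.Int.floordiv p.1 agent_num + 1)) 0

-- ===== PRECONDITION & SPEC =====
-- Pre_ excludes exactly the inputs on which A raises: a non-empty list with
-- list_length ≠ agent_num and agent_num ≤ 0 (ZeroDivisionError at '% agent_num' for
-- agent_num == 0, KeyError on the empty bucket dict for agent_num < 0).
def Pre_deploying (input_list : List Int) (list_length : Int) (agent_num : Int) : Prop :=
  list_length = agent_num ∨ input_list = [] ∨ 0 < agent_num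
instance (input_list : List Int) (list_length : Int) (agent_num : Int) : Decidable (Pre_deploying input_list list_length agent_num) := by unfold Pre_deploying; infer_instance
def pvWitness_deploying : List Int × Int × Int := ([5, 1, 3, 2], 4, 2)

def Spec_deploying (input_list : List Int) (list_length : Int) (agent_num : Int) (out : Int) : Prop := out = deploying_alt input_list list_length agent_num
instance (input_list : List Int) (list_length : Int) (agent_num : Int) (out : Int) : Decidable (Spec_deploying input_list list_length agent_num out) := by unfold Spec_deploying; infer_instance

-- ===== CLAIM (what is proved, stated in full; the proofs are below) =====
def Claim_equal_deploying : Prop := ∀ (input_list : List Int) (list_length : Int) (agent_num : Int), Dom_deploying input_list list_length agent_num → Pre_deploying input_list list_length agent_num → Spec_deploying input_list list_length agent_num (deploying input_list list_length agent_num)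

-- ===== LEMMAS AND PROOFS =====

-- the bucket dict with key set {0, …, n-1} and value g k at key k
def rangeDict (n : Int) (g : Int → List Int) : PySem.Dict Int (List Int) :=
  PySem.Dict.mk ((PySem.List.pyRange 0 n 1).map (fun k => (k, g k)))

-- bucket k of the round-robin distribution of s over n agents
def buckets (n : Int) (s : List Int) (k : Int) : List Int :=
  (PySem.List.enumerate s 0).filterMap
    (fun p => if PySem.Int.mod p.1 n = k then some p.2 else none)

-- A's inner weighted bucket sum
def wsum (l : List Int) : Int :=
  (PySem.List.enumerate l 0).foldl (fun tmp q => tmp + q.2 * (q.1 + 1)) 0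

lemma rangeDict_congr (n : Int) (g g' : Int → List Int)
    (h : ∀ k, 0 ≤ k → k < n → g k = g' k) : rangeDict n g = rangeDict n g' := by
  unfold rangeDict
  congr 1
  apply List.map_congr_left
  intro k hk
  rw [PySem.List.mem_pyRange_one] at hk
  rw [h k hk.1 hk.2]

lemma contains_rangeDict (n : Int) (g : Int → List Int) (k : Int)
    (h0 : 0 ≤ k) (h1 : k < n) : (rangeDict n g).contains k = true := by
  simp only [rangeDict, PySem.Dict.contains_mk, List.any_eq_true]
  exact ⟨(k, g k), List.mem_map.mpr ⟨k, PySem.List.mem_pyRange_one.mpr ⟨h0, h1⟩, rfl⟩, by simp⟩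

lemma get?_mkmap (g : Int → List Int) (k : Int) (l : List Int) (hmem : k ∈ l) :
    (PySem.Dict.mk (l.map (fun j => (j, g j)))).get? k = some (g k) := by
  induction l with
  | nil => simp at hmem
  | cons a l ih =>
    simp only [List.map_cons, PySem.Dict.get?_mk_cons]
    by_cases hak : a = k
    · subst hak; simp
    · rw [if_neg (by simpa using hak)]
      refine ih ?_
      rcases List.mem_cons.mp hmem with h | h
      · exact absurd h.symm hak
      · exact h

lemma get?_rangeDict (n : Int) (g : Int → List Int) (k : Int)
    (h0 : 0 ≤ k) (h1 : k < n) : (rangeDict n g).get? k = some (g k) :=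
  get?_mkmap g k _ (PySem.List.mem_pyRange_one.mpr ⟨h0, h1⟩)

lemma modify_rangeDict (n : Int) (g : Int → List Int) (k : Int)
    (h0 : 0 ≤ k) (h1 : k < n) (f : List Int → List Int) :
    (rangeDict n g).modify k [] f
      = rangeDict n (fun j => if j = k then f (g j) else g j) := by
  unfold PySem.Dict.modify
  have hget : (rangeDict n g).getD k [] = g k := by
    unfold PySem.Dict.getD
    rw [get?_rangeDict n g k h0 h1]
    rfl
  rw [hget]
  unfold PySem.Dict.insert
  rw [contains_rangeDict n g k h0 h1]
  simp only [if_true, rangeDict, List.map_map]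
  congr 1
  apply List.map_congr_left
  intro j hj
  by_cases hjk : j = k
  · subst hjk; simp
  · simp [Function.comp, hjk]

lemma buckets_snoc (n : Int) (t : List Int) (x : Int) (k : Int) :
    buckets n (t ++ [x]) k
      = buckets n t k ++ (if PySem.Int.mod (t.length : Int) n = k then [x] else []) := by
  unfold buckets
  rw [PySem.List.enumerate_append, List.filterMap_append]
  by_cases h : PySem.Int.mod (t.length : Int) n = k <;>
    simp [PySem.List.enumerate, h]

lemma dist_eq (n : Int) (hn : 0 < n) (s : List Int) :
    (PySem.List.enumerate s 0).foldl
        (fun d p => d.modify (PySem.Int.mod p.1 n) [] (fun l => l ++ [p.2]))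
        (rangeDict n (fun _ => []))
      = rangeDict n (buckets n s) := by
  induction s using List.reverseRecOn with
  | nil => exact rangeDict_congr n _ _ (by intro k _ _; simp [buckets, PySem.List.enumerate])
  | append_singleton t x ih =>
    rw [PySem.List.enumerate_append, List.foldl_append, ih]
    simp only [PySem.List.enumerate, List.foldl_cons, List.foldl_nil, zero_add]
    rw [modify_rangeDict n _ _ (PySem.Int.mod_nonneg _ hn) (PySem.Int.mod_lt _ hn)]
    apply rangeDict_congr
    intro k _ _
    rw [buckets_snoc]
    by_cases h : k = PySem.Int.mod (t.length : Int) n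
    · simp [h]
    · have h' : ¬ PySem.Int.mod (t.length : Int) n = k := fun hh => h hh.symm
      simp [h, h']

lemma wsum_snoc (l : List Int) (x : Int) :
    wsum (l ++ [x]) = wsum l + x * ((l.length : Int) + 1) := by
  unfold wsum
  rw [PySem.List.enumerate_append, List.foldl_append]
  simp [PySem.List.enumerate]

lemma sum_ite_single (l : List Int) (hl : l.Nodup) (r : Int) (hr : r ∈ l) (c : Int → Int) :
    (l.map (fun k => if r = k then c k else 0)).sum = c r := by
  induction l with
  | nil => simp at hr
  | cons a l ih =>
    rcases List.mem_cons.mp hr with rfl | h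
    · have hz : (List.map (fun k => if r = k then c k else 0) l).sum = 0 := by
        apply List.sum_eq_zero
        intro y hy
        rcases List.mem_map.mp hy with ⟨k, hk, rfl⟩
        have hrk : r ≠ k := fun hh => (List.nodup_cons.mp hl).1 (hh ▸ hk)
        simp [hrk]
      simp [hz]
    · have hra : r ≠ a := fun hh => (List.nodup_cons.mp hl).1 (hh ▸ h)
      simp only [List.map_cons, List.sum_cons, if_neg (fun hh => hra hh)]
      rw [ih (List.nodup_cons.mp hl).2 h]
      ring

lemma count_residues (n : Int) (hn : 0 < n) (k : Int) (hk0 : 0 ≤ k) (hk : k < n)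
    (f : Int → Int) (m : Nat) :
    (((PySem.List.pyRange 0 (m : Int) 1).filterMap
        (fun j => if PySem.Int.mod j n = k then some (f j) else none)).length : Int)
      = PySem.Int.floordiv (m : Int) n
        + (if k < PySem.Int.mod (m : Int) n then 1 else 0) := by
  induction m with
  | zero =>
    have hf : PySem.Int.floordiv 0 n = 0 := by
      rw [PySem.Int.floordiv_eq_ediv_of_pos hn]; simp
    have hm : PySem.Int.mod 0 n = 0 := by
      rw [PySem.Int.mod_eq_emod_of_pos hn]; simp
    rw [Nat.cast_zero, PySem.List.pyRange_one_eq_nil le_rfl, hf, hm,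
      if_neg (not_lt.mpr hk0)]
    simp
  | succ m ih =>
    obtain ⟨q, r, hq', hr', hqr, hr0, hrn⟩ :
        ∃ q r, PySem.Int.floordiv (m : Int) n = q ∧ PySem.Int.mod (m : Int) n = r ∧
          q * n + r = (m : Int) ∧ 0 ≤ r ∧ r < n :=
      ⟨_, _, rfl, rfl, PySem.Int.floordiv_mul_add_mod _ _,
        PySem.Int.mod_nonneg _ hn, PySem.Int.mod_lt _ hn⟩
    rw [hq', hr'] at ih
    have hfm := PySem.Int.floordiv_mul_add_mod ((m : Int) + 1) n
    push_cast
    rw [PySem.List.pyRange_one_succ_right (by positivity), List.filterMap_append,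
      List.length_append]
    push_cast
    rw [ih]
    have hsingle :
        ((List.filterMap (fun j => if PySem.Int.mod j n = k then some (f j) else none)
          [(m : Int)]).length : Int) = if r = k then 1 else 0 := by
      by_cases h : r = k <;> simp [hr', h]
    rw [hsingle]
    by_cases hc : r = n - 1
    · have hF : PySem.Int.floordiv ((m : Int) + 1) n = q + 1 := by
        have e1 : (q + 1) * n = q * n + n := by ring
        have e2 : (q + 1 + 1) * n = q * n + n + n := by ring
        refine (PySem.Int.floordiv_eq_iff_of_pos hn).mpr ⟨?_, ?_⟩
        · rw [e1]; linarith
        · rw [e2]; linarith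
      have hM : PySem.Int.mod ((m : Int) + 1) n = 0 := by
        rw [hF] at hfm
        have e1 : (q + 1) * n = q * n + n := by ring
        rw [e1] at hfm
        linarith
      rw [hF, hM]
      clear hfm hqr hq' hr' ih hsingle
      split_ifs <;> omega
    · have hF : PySem.Int.floordiv ((m : Int) + 1) n = q := by
        have e1 : (q + 1) * n = q * n + n := by ring
        refine (PySem.Int.floordiv_eq_iff_of_pos hn).mpr ⟨?_, ?_⟩
        · linarith
        · rw [e1]; omega
      have hM : PySem.Int.mod ((m : Int) + 1) n = r + 1 := by
        rw [hF] at hfm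
        linarith
      rw [hF, hM]
      clear hfm hqr hq' hr' ih hsingle
      split_ifs <;> omega

lemma buckets_length (n : Int) (hn : 0 < n) (t : List Int) :
    ((buckets n t (PySem.Int.mod (t.length : Int) n)).length : Int)
      = PySem.Int.floordiv (t.length : Int) n := by
  unfold buckets
  rw [PySem.List.enumerate_eq_map_pyRange t 0, List.filterMap_map, PySem.List.len_eq]
  have := count_residues n hn (PySem.Int.mod (t.length : Int) n)
    (PySem.Int.mod_nonneg _ hn) (PySem.Int.mod_lt _ hn)
    (fun j => PySem.List.pyGetD t j 0) t.length
  simp only [Function.comp] at this ⊢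
  rw [this]
  simp

lemma main_sum (n : Int) (hn : 0 < n) (s : List Int) :
    ((PySem.List.pyRange 0 n 1).map (fun k => wsum (buckets n s k))).sum
      = (PySem.List.enumerate s 0).foldl
          (fun acc p => acc + p.2 * (PySem.Int.floordiv p.1 n + 1)) 0 := by
  induction s using List.reverseRecOn with
  | nil => simp [wsum, buckets, PySem.List.enumerate]
  | append_singleton t x ih =>
    rw [PySem.List.enumerate_append, List.foldl_append]
    simp only [PySem.List.enumerate, List.foldl_cons, List.foldl_nil, zero_add]
    have hsplit : ((PySem.List.pyRange 0 n 1).map (fun k => wsum (buckets n (t ++ [x]) k)))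
        = (PySem.List.pyRange 0 n 1).map (fun k => wsum (buckets n t k)
            + (if PySem.Int.mod (t.length : Int) n = k
                then x * (((buckets n t k).length : Int) + 1) else 0)) := by
      apply List.map_congr_left
      intro k _
      rw [buckets_snoc]
      by_cases h : PySem.Int.mod (t.length : Int) n = k
      · rw [if_pos h, if_pos h, wsum_snoc]
      · simp [h]
    rw [hsplit, PySem.List.sum_map_add_int, ih,
      sum_ite_single _ (PySem.List.nodup_pyRange_one 0 n) _
        (PySem.List.mem_pyRange_one.mpr ⟨PySem.Int.mod_nonneg _ hn, PySem.Int.mod_lt _ hn⟩)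
        (fun k => x * (((buckets n t k).length : Int) + 1)),
      buckets_length n hn t]

lemma foldl_wsum (L : List (Int × List Int)) :
    L.foldl (fun result p => result
        + (PySem.List.enumerate p.2 0).foldl (fun tmp q => tmp + q.2 * (q.1 + 1)) 0) 0
      = (L.map (fun p => wsum p.2)).sum := by
  have h : (fun (result : Int) (p : Int × List Int) => result
      + (PySem.List.enumerate p.2 0).foldl (fun tmp q => tmp + q.2 * (q.1 + 1)) 0)
      = fun acc p => acc + (fun p : Int × List Int => wsum p.2) p := rfl
  rw [h, PySem.List.foldl_add L (fun p => wsum p.2) 0, zero_add]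

-- ===== VERDICT (by name: the statement is the Claim_ definition above) =====
theorem deploying_spec : Claim_equal_deploying := by
  intro input_list list_length agent_num _ hpre
  unfold Spec_deploying deploying deploying_alt
  by_cases hl : list_length = agent_num
  · simp [hl]
  · simp only [hl, if_false]
    rw [show PySem.Dict.mk ((PySem.List.pyRange 0 agent_num 1).map (fun each_num => (each_num, ([] : List Int))))
        = rangeDict agent_num (fun _ => []) from rfl, foldl_wsum]
    rcases hpre with h | h | h
    · exact absurd h hl
    · subst h
      rw [show PySem.List.sorted ([] : List Int) (fun x => x) true = [] from rfl]
      simp only [PySem.List.enumerate, List.foldl_nil]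
      apply List.sum_eq_zero
      intro y hy
      rcases List.mem_map.mp hy with ⟨p, hp, rfl⟩
      have hp' : p ∈ (PySem.List.pyRange 0 agent_num 1).map (fun k => (k, ([] : List Int))) := hp
      rcases List.mem_map.mp hp' with ⟨k, _, rfl⟩
      simp [wsum, PySem.List.enumerate]
    · rw [dist_eq agent_num h]
      rw [show (rangeDict agent_num (buckets agent_num (PySem.List.sorted input_list (fun x => x) true))).items
          = (PySem.List.pyRange 0 agent_num 1).map
              (fun k => (k, buckets agent_num (PySem.List.sorted input_list (fun x => x) true) k)) from rfl,
        List.map_map,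
        show ((fun p : Int × List Int => wsum p.2)
            ∘ fun k => (k, buckets agent_num (PySem.List.sorted input_list (fun x => x) true) k))
          = fun k => wsum (buckets agent_num (PySem.List.sorted input_list (fun x => x) true) k) from rfl]
      exact main_sum agent_num h _
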